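-- pv_equiv track=rewrite | github.com/themaigod/WSI-with-Gaze-Processing | InitDataset/InitDataset.py | produce_add_list
-- ===== SOURCE A (Python) =====
-- def produce_add_list(list_a):
--     add_list = []
--     for i in range(len(list_a)):
--         if i == 0:
--             add_list.append(len(list_a[i]))
--         else:
--             add_list.append(len(list_a[i]) + add_list[i - 1])
--     return add_list
-- ===== SOURCE B (Python) =====
-- def produce_add_list(list_a):
--     # Recursive decomposition: prefix sums of the tail, each shifted by the
--     # head's length, prepended with the head's length itself.
--     if not list_a:
--         return []
--     head = len(list_a[0])
--     return [head] + [head + x for x in produce_add_list(list_a[1:])]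
-- ===== Notes on version B (the rewrite author's own statement) =====
-- stated objective: alternative
-- what changed: Replaces A's index-based single-pass accumulation (i==0 special case, add_list[i-1] back-reference) by a structural recursion: recursively compute the prefix sums of the tail, then shift every entry by the head's length and prepend it.
import Mathlib
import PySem

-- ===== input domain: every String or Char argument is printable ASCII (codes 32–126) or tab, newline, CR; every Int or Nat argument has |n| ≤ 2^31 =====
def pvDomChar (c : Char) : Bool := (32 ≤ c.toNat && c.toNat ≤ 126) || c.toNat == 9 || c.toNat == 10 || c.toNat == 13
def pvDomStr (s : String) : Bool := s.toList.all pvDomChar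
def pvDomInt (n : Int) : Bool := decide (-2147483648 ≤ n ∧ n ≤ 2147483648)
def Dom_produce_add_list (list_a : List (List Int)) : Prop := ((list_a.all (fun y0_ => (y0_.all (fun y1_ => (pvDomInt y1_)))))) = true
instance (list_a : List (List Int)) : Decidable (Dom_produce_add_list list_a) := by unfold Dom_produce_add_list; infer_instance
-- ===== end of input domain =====

-- B replaces A's index-based accumulation by a structural recursion (tail's prefix sums shifted by the head's length); objective: alternative.

-- ===== PORT A =====
def produce_add_list (list_a : List (List Int)) : List Int :=
  (PySem.List.pyRange 0 (list_a.length : Int) 1).foldl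
    (fun add_list i =>
      if i == 0 then
        add_list ++ [((PySem.List.pyGetD list_a i []).length : Int)]
      else
        add_list ++ [((PySem.List.pyGetD list_a i []).length : Int)
                      + PySem.List.pyGetD add_list (i - 1) 0])
    []

-- ===== PORT B =====
-- recursion on the head: [head] + [head + x for x in produce_add_list(rest)]
def produce_add_list_alt : List (List Int) → List Int
  | [] => []
  | sub :: rest =>
      (sub.length : Int) :: (produce_add_list_alt rest).map (fun x => (sub.length : Int) + x)

-- ===== PRECONDITION & SPEC =====
def Spec_produce_add_list (list_a : List (List Int)) (out : List Int) : Prop := out = produce_add_list_alt list_a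
instance (list_a : List (List Int)) (out : List Int) : Decidable (Spec_produce_add_list list_a out) := by unfold Spec_produce_add_list; infer_instance

-- ===== CLAIM (what is proved, stated in full; the proofs are below) =====
def Claim_equal_produce_add_list : Prop := ∀ (list_a : List (List Int)), Dom_produce_add_list list_a → Spec_produce_add_list list_a (produce_add_list list_a)

-- ===== LEMMAS AND PROOFS =====

-- prefix sum of lengths of the first m sublists
def pvS (la : List (List Int)) (m : Nat) : Int :=
  ((la.take m).map (fun x => (x.length : Int))).sum

lemma pvS_succ (la : List (List Int)) (k : Nat) (h : k < la.length) :
    pvS la (k + 1) = pvS la k + (la[k].length : Int) := by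
  unfold pvS
  rw [List.take_add_one, List.getElem?_eq_getElem h]
  rw [List.map_append, List.sum_append]
  simp

lemma alt_eq_map (la : List (List Int)) :
    produce_add_list_alt la = (List.range la.length).map (fun k => pvS la (k + 1)) := by
  induction la with
  | nil => simp [produce_add_list_alt]
  | cons x xs ih =>
    simp only [produce_add_list_alt, ih, List.length_cons, List.range_succ_eq_map,
      List.map_cons, List.map_map]
    refine List.cons_eq_cons.mpr ⟨by simp [pvS], ?_⟩
    apply List.map_congr_left
    intro k _
    simp only [Function.comp, Nat.succ_eq_add_one]
    have : pvS (x :: xs) (k + 1 + 1) = (x.length : Int) + pvS xs (k + 1) := by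
      simp [pvS, List.take_succ_cons]
    rw [this]

lemma fold_eq_map (la : List (List Int)) :
    ∀ (n : Nat), n ≤ la.length →
    (PySem.List.pyRange 0 (n : Int) 1).foldl
      (fun add_list i =>
        if i == 0 then
          add_list ++ [((PySem.List.pyGetD la i []).length : Int)]
        else
          add_list ++ [((PySem.List.pyGetD la i []).length : Int)
                        + PySem.List.pyGetD add_list (i - 1) 0])
      []
      = (List.range n).map (fun k => pvS la (k + 1)) := by
  intro n
  induction n with
  | zero => intro _; simp
  | succ m ih =>
    intro h
    have hm : m ≤ la.length := Nat.le_of_succ_le h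
    have hrange : PySem.List.pyRange 0 ((m : Nat) + 1 : Int) 1
        = PySem.List.pyRange 0 (m : Int) 1 ++ [(m : Int)] := by
      exact PySem.List.pyRange_one_succ_right (by positivity)
    have hc : ((m + 1 : Nat) : Int) = ((m : Nat) : Int) + 1 := by push_cast; ring
    rw [hc, hrange, List.foldl_append, ih hm]
    simp only [List.foldl_cons, List.foldl_nil]
    by_cases hm0 : m = 0
    · subst hm0
      have h0 : 0 < la.length := h
      simp [pvS, List.range_succ, PySem.List.pyGetD_zero, List.getD_eq_getElem?_getD,
        List.getElem?_eq_getElem h0, List.take_add_one, List.take_zero]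
    · have hmlt : m < la.length := h
      have hne : ((m : Int) == 0) = false := by
        simp [hm0]
      rw [hne]
      simp only [Bool.false_eq_true, if_false]
      have hidx : PySem.List.pyGetD ((List.range m).map (fun k => pvS la (k + 1))) ((m : Int) - 1) 0
          = pvS la m := by
        have hm1 : (m : Int) - 1 = ((m - 1 : Nat) : Int) := by
          have : 1 ≤ m := Nat.one_le_iff_ne_zero.mpr hm0
          push_cast [this]; ring
        rw [hm1, PySem.List.pyGetD_natCast]
        have hlt : m - 1 < (List.range m).length := by
          simp; omega
        rw [List.getD_eq_getElem?_getD, List.getElem?_map, List.getElem?_range (by omega)]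
        have : m - 1 + 1 = m := by omega
        simp [this]
      rw [hidx, PySem.List.pyGetD_natCast]
      rw [List.range_succ, List.map_append]
      simp [List.getD_eq_getElem?_getD, List.getElem?_eq_getElem hmlt, pvS_succ la m hmlt]
      ring

-- ===== VERDICT (by name: the statement is the Claim_ definition above) =====
theorem produce_add_list_spec : Claim_equal_produce_add_list := by
  intro la _
  unfold Spec_produce_add_list produce_add_list
  rw [fold_eq_map la la.length (le_refl _), alt_eq_map]
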